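-- pv_equiv track=rewrite | github.com/MoeenNehzati/video | scripts/add_violin_to_bach.py | merge_plan
-- ===== SOURCE A (Python) =====
-- def merge_plan(plan):
--     merged = []
--     for pitch, duration in plan:
--         if merged and merged[-1][0] == pitch:
--             merged[-1] = (pitch, merged[-1][1] + duration)
--         else:
--             merged.append((pitch, duration))
--     return merged
-- ===== SOURCE B (Python) =====
-- def merge_plan(plan):
--     pitches = [p for p, _ in plan]
--     starts = [i for i in range(len(plan))
--               if i == 0 or pitches[i - 1] != pitches[i]]
--     bounds = starts + [len(plan)]
--     return [(pitches[s], sum(d for _, d in plan[s:e]))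
--             for s, e in zip(bounds, bounds[1:])]
-- ===== Notes on version B (the rewrite author's own statement) =====
-- stated objective: alternative
-- what changed: Replaces A's single pass that mutates the last output element with a staged index-based computation: first find all run-boundary indices by comparing neighbouring pitches, then build the result from slices between consecutive boundaries.
import Mathlib
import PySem

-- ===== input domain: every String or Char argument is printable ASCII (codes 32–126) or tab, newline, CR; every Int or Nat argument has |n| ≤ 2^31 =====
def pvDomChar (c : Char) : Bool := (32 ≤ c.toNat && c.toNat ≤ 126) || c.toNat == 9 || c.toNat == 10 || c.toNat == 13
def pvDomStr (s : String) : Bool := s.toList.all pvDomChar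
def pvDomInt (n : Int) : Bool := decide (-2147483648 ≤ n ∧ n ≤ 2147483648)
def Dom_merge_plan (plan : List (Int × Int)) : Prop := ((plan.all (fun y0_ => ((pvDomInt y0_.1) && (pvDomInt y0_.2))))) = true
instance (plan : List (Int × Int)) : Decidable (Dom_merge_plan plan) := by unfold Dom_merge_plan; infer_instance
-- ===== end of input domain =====

-- B replaces A's look-back single pass with a staged index-based computation:
-- run-boundary indices first, then slice-and-sum between consecutive boundaries (alternative decomposition, same cost).


-- ===== PORT A =====
-- one loop iteration: inspect merged[-1]; either replace it (summing durations) or append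
def mergeStep (merged : List (Int × Int)) (pd : Int × Int) : List (Int × Int) :=
  match merged.getLast? with
  | some (q, s) =>
      if q = pd.1 then merged.dropLast ++ [(pd.1, s + pd.2)]
      else merged ++ [(pd.1, pd.2)]
  | none => [(pd.1, pd.2)]

def merge_plan (plan : List (Int × Int)) : List (Int × Int) :=
  plan.foldl mergeStep []

-- ===== PORT B =====
-- pitches = [p for p, _ in plan]
def pvPitches (plan : List (Int × Int)) : List Int := plan.map Prod.fst

-- starts = [i for i in range(len(plan)) if i == 0 or pitches[i-1] != pitches[i]]
-- (pitches[i-1]/pitches[i] are always in range here, so pyGetD with a dummy default is exact)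
def pvStarts (plan : List (Int × Int)) : List Int :=
  (PySem.List.pyRange 0 (plan.length : Int) 1).filter
    (fun i => i == 0 || !(PySem.List.pyGetD (pvPitches plan) (i - 1) 0 ==
                          PySem.List.pyGetD (pvPitches plan) i 0))

-- bounds = starts + [len(plan)]
def pvBounds (plan : List (Int × Int)) : List Int :=
  pvStarts plan ++ [(plan.length : Int)]

-- [(pitches[s], sum(d for _, d in plan[s:e])) for s, e in zip(bounds, bounds[1:])]
def merge_plan_alt (plan : List (Int × Int)) : List (Int × Int) :=
  ((pvBounds plan).zip (pvBounds plan).tail).map (fun se =>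
    (PySem.List.pyGetD (pvPitches plan) se.1 0,
     ((PySem.List.slice plan (some se.1) (some se.2)).map Prod.snd).sum))

-- ===== PRECONDITION & SPEC =====
def Spec_merge_plan (plan : List (Int × Int)) (out : List (Int × Int)) : Prop := out = merge_plan_alt plan
instance (plan : List (Int × Int)) (out : List (Int × Int)) : Decidable (Spec_merge_plan plan out) := by unfold Spec_merge_plan; infer_instance

-- ===== CLAIM (what is proved, stated in full; the proofs are below) =====
def Claim_equal_merge_plan : Prop := ∀ (plan : List (Int × Int)), Dom_merge_plan plan → Spec_merge_plan plan (merge_plan plan)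

-- ===== LEMMAS AND PROOFS =====
-- Both ports are proved equal to the canonical run-recursion mergeRuns.

def mergeRuns : List (Int × Int) → List (Int × Int)
  | [] => []
  | (p, d) :: rest =>
      (p, d + ((rest.takeWhile (fun x => x.1 == p)).map Prod.snd).sum)
        :: mergeRuns (rest.dropWhile (fun x => x.1 == p))
termination_by plan => plan.length
decreasing_by
  simp only [List.length_cons]
  exact Nat.lt_succ_of_le (List.length_dropWhile_le _ _)

-- startsI/boundsI: pvStarts/pvBounds expressed over the pitch list alone
def startsI (xs : List Int) : List Int :=
  (PySem.List.pyRange 0 (xs.length : Int) 1).filter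
    (fun i => i == 0 || !(PySem.List.pyGetD xs (i - 1) 0 == PySem.List.pyGetD xs i 0))
def boundsI (xs : List Int) : List Int := startsI xs ++ [(xs.length : Int)]

theorem pvStarts_eq (plan : List (Int × Int)) : pvStarts plan = startsI (pvPitches plan) := by
  simp [pvStarts, startsI, pvPitches]

theorem pvBounds_eq (plan : List (Int × Int)) : pvBounds plan = boundsI (pvPitches plan) := by
  simp [pvBounds, boundsI, pvStarts_eq, pvPitches]

theorem getI_run (q : Int) (u v : List Int) (hu : ∀ x ∈ u, x = q) {i : Int}
    (h0 : 0 ≤ i) (h1 : i < (u.length : Int) + 1) :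
    PySem.List.pyGetD ((q :: u) ++ v) i 0 = q := by
  have hlt : i.toNat < (q :: u).length := by simp; omega
  rw [PySem.List.pyGetD_eq_getElem _ _ h0 (by simp; omega)]
  rw [List.getElem_append_left hlt]
  have hm : (q :: u)[i.toNat] ∈ q :: u := List.getElem_mem hlt
  rcases List.mem_cons.mp hm with h | h
  · exact h
  · exact hu _ h

theorem getI_shift (q : Int) (u v : List Int) {i : Int} (h0 : 0 ≤ i) :
    PySem.List.pyGetD ((q :: u) ++ v) (((u.length : Int) + 1) + i) 0
      = PySem.List.pyGetD v i 0 := by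
  rw [PySem.List.pyGetD_of_nonneg _ _ (by omega), PySem.List.pyGetD_of_nonneg _ _ h0]
  have ht : (((u.length : Int) + 1) + i).toNat = (q :: u).length + i.toNat := by simp; omega
  rw [ht]
  simp only [List.getD_eq_getElem?_getD]
  rw [List.getElem?_append_right (by simp)]
  simp

theorem startsI_run (q : Int) (u v : List Int) (hu : ∀ x ∈ u, x = q)
    (hv : ∀ x, v.head? = some x → x ≠ q) :
    startsI ((q :: u) ++ v) = 0 :: (startsI v).map (· + ((u.length : Int) + 1)) := by
  have huL : (0 : Int) ≤ (u.length : Int) := Int.natCast_nonneg _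
  have hvL : (0 : Int) ≤ (v.length : Int) := Int.natCast_nonneg _
  set L : Int := (u.length : Int) + 1 with hL
  have hrun : ∀ i : Int, 0 ≤ i → i < L → PySem.List.pyGetD ((q :: u) ++ v) i 0 = q :=
    fun i h0 h1 => getI_run q u v hu h0 h1
  unfold startsI
  have hlen : ((((q :: u) ++ v).length : Int)) = L + (v.length : Int) := by
    simp [hL]; ring
  rw [hlen]
  rw [PySem.List.pyRange_one_append 0 L (L + (v.length : Int)) (by omega) (by omega)]
  rw [List.filter_append]
  have hA : (PySem.List.pyRange 0 L 1).filter
      (fun i => i == 0 || !(PySem.List.pyGetD ((q :: u) ++ v) (i - 1) 0 ==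
                            PySem.List.pyGetD ((q :: u) ++ v) i 0)) = [0] := by
    rw [PySem.List.pyRange_one_cons (by omega)]
    rw [List.filter_cons]
    simp only [BEq.rfl, Bool.true_or, if_true]
    have : (PySem.List.pyRange 1 L 1).filter
        (fun i => i == 0 || !(PySem.List.pyGetD ((q :: u) ++ v) (i - 1) 0 ==
                              PySem.List.pyGetD ((q :: u) ++ v) i 0)) = [] := by
      rw [List.filter_eq_nil_iff]
      intro i hi
      obtain ⟨h1, h2⟩ := PySem.List.mem_pyRange_one.mp hi
      rw [hrun (i - 1) (by omega) (by omega), hrun i (by omega) h2]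
      simp; omega
    rw [show ((0:Int)+1) = 1 by norm_num, this]
  rw [hA]
  have hmapR : PySem.List.pyRange L (L + (v.length : Int)) 1
      = (PySem.List.pyRange 0 (v.length : Int) 1).map (· + L) := by
    rw [PySem.List.pyRange_one, PySem.List.pyRange_one]
    have h1 : (L + (v.length : Int) - L) = (v.length : Int) := by ring
    rw [h1, List.map_map]
    apply List.map_congr_left
    intro k _
    simp; ring
  rw [hmapR, List.filter_map]
  have hcong : ∀ i ∈ PySem.List.pyRange 0 (v.length : Int) 1,
      ((fun i => i == 0 || !(PySem.List.pyGetD ((q :: u) ++ v) (i - 1) 0 ==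
                             PySem.List.pyGetD ((q :: u) ++ v) i 0)) ∘ (· + L)) i
      = (fun i => i == 0 || !(PySem.List.pyGetD v (i - 1) 0 == PySem.List.pyGetD v i 0)) i := by
    intro i hi
    obtain ⟨h0i, him⟩ := PySem.List.mem_pyRange_one.mp hi
    simp only [Function.comp_apply]
    have hne : (i + L == 0) = false := by simp; omega
    by_cases hi0 : i = 0
    · subst hi0
      have hg1 : PySem.List.pyGetD ((q :: u) ++ v) (0 + L - 1) 0 = q := by
        apply hrun <;> omega
      have hg2 : PySem.List.pyGetD ((q :: u) ++ v) (0 + L) 0 = PySem.List.pyGetD v 0 0 := by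
        have := getI_shift q u v (i := 0) (by omega)
        simpa using this
      cases v with
      | nil => simp at him
      | cons x v' =>
          have hx : x ≠ q := hv x rfl
          rw [hne, hg1, hg2]
          simp [PySem.List.pyGetD_zero_cons, Ne.symm hx]
    · have hg1 : PySem.List.pyGetD ((q :: u) ++ v) (i + L - 1) 0
          = PySem.List.pyGetD v (i - 1) 0 := by
        have := getI_shift q u v (i := i - 1) (by omega)
        have harith : L + (i - 1) = i + L - 1 := by ring
        rw [harith] at this
        exact this
      have hg2 : PySem.List.pyGetD ((q :: u) ++ v) (i + L) 0 = PySem.List.pyGetD v i 0 := by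
        have := getI_shift q u v (i := i) h0i
        have harith : L + i = i + L := by ring
        rw [harith] at this
        exact this
      rw [hne, hg1, hg2]
      have hne2 : (i == 0) = false := by simp; omega
      rw [hne2]
  rw [List.filter_congr hcong]
  rfl

theorem boundsI_run (q : Int) (u v : List Int) (hu : ∀ x ∈ u, x = q)
    (hv : ∀ x, v.head? = some x → x ≠ q) :
    boundsI ((q :: u) ++ v) = 0 :: (boundsI v).map (· + ((u.length : Int) + 1)) := by
  unfold boundsI
  rw [startsI_run q u v hu hv]
  simp
  ring

theorem boundsI_head (xs : List Int) : ∃ c, boundsI xs = 0 :: c := by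
  cases xs with
  | nil => exact ⟨[], rfl⟩
  | cons x t =>
      have h : startsI (x :: t) = 0 :: (PySem.List.pyRange (0 + 1) (((x :: t).length : Int)) 1).filter
          (fun i => i == 0 || !(PySem.List.pyGetD (x :: t) (i - 1) 0 == PySem.List.pyGetD (x :: t) i 0)) := by
        unfold startsI
        rw [PySem.List.pyRange_one_cons (by simp)]
        rw [List.filter_cons]
        simp only [BEq.rfl, Bool.true_or, if_true]
      have h2 : boundsI (x :: t) = 0 :: ((PySem.List.pyRange (0 + 1) (((x :: t).length : Int)) 1).filter
          (fun i => i == 0 || !(PySem.List.pyGetD (x :: t) (i - 1) 0 == PySem.List.pyGetD (x :: t) i 0)) ++ [((x :: t).length : Int)]) := by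
        unfold boundsI
        rw [h]
        simp
      exact ⟨_, h2⟩

theorem head_dropWhile_false {l : List (Int × Int)} {p : Int × Int → Bool} {x : Int × Int}
    (h : (l.dropWhile p).head? = some x) : p x = false := by
  induction l with
  | nil => simp [List.dropWhile] at h
  | cons a t ih =>
      rw [List.dropWhile_cons] at h
      split at h
      · exact ih h
      · next hp => simp at h; subst h; simpa using hp

theorem mem_boundsI_nonneg {xs : List Int} {x : Int} (h : x ∈ boundsI xs) : 0 ≤ x := by
  unfold boundsI startsI at h
  rcases List.mem_append.mp h with h | h
  · exact (PySem.List.mem_pyRange_one.mp (List.mem_of_mem_filter h)).1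
  · simp at h; omega

theorem alt_step (p d : Int) (rest : List (Int × Int)) :
    merge_plan_alt ((p, d) :: rest)
      = (p, d + ((rest.takeWhile (fun x => x.1 == p)).map Prod.snd).sum)
        :: merge_plan_alt (rest.dropWhile (fun x => x.1 == p)) := by
  set t := rest.takeWhile (fun x => x.1 == p) with ht
  set r := rest.dropWhile (fun x => x.1 == p) with hr
  have hrest : rest = t ++ r := (List.takeWhile_append_dropWhile).symm
  set L : Int := ((t.map Prod.fst).length : Int) + 1 with hLdef
  have hLt : L = (t.length : Int) + 1 := by simp [hLdef]
  have hL1 : 1 ≤ L := by have : (0:Int) ≤ (t.length : Int) := Int.natCast_nonneg _; omega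
  have hpitch : pvPitches ((p, d) :: rest) = (p :: t.map Prod.fst) ++ pvPitches r := by
    simp [pvPitches, hrest]
  have hu : ∀ x ∈ t.map Prod.fst, x = p := by
    intro x hx
    rcases List.mem_map.mp hx with ⟨y, hy, rfl⟩
    have := List.mem_takeWhile_imp hy
    simpa using this
  have hv : ∀ x, (pvPitches r).head? = some x → x ≠ p := by
    intro x hx
    cases hrr : r with
    | nil => rw [hrr] at hx; simp [pvPitches] at hx
    | cons y r' =>
        rw [hrr] at hx
        simp [pvPitches] at hx
        have hpy : (fun x : Int × Int => x.1 == p) y = false := by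
          apply head_dropWhile_false (l := rest) (p := fun x => x.1 == p)
          rw [← hr, hrr]; rfl
        simp at hpy
        rw [← hx]
        exact hpy
  have hb : pvBounds ((p, d) :: rest) = 0 :: (pvBounds r).map (· + L) := by
    rw [pvBounds_eq, pvBounds_eq, hpitch]
    exact boundsI_run p (t.map Prod.fst) (pvPitches r) hu hv
  obtain ⟨c, hc0⟩ := boundsI_head (pvPitches r)
  have hc : pvBounds r = 0 :: c := by rw [pvBounds_eq]; exact hc0
  have hplan : (p, d) :: rest = ((p, d) :: t) ++ r := by rw [hrest]; rfl
  -- unfold B on both sides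
  unfold merge_plan_alt
  rw [hb, hc]
  simp only [List.map_cons, zero_add, List.tail_cons]
  -- bounds plan = 0 :: L :: c.map (+L); zip = (0, L) :: zip (L :: c') c'
  rw [List.zip_cons_cons, List.map_cons]
  congr 1
  · -- head element
    show (PySem.List.pyGetD (pvPitches ((p, d) :: rest)) 0 0,
        ((PySem.List.slice ((p, d) :: rest) (some 0) (some L)).map Prod.snd).sum)
      = (p, d + (t.map Prod.snd).sum)
    have hhead1 : PySem.List.pyGetD (pvPitches ((p, d) :: rest)) 0 0 = p := by
      rw [hpitch]
      simp [PySem.List.pyGetD_zero_cons]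
    have hhead2 : PySem.List.slice ((p, d) :: rest) (some 0) (some L) = (p, d) :: t := by
      rw [PySem.List.slice_toNat _ (by omega) (by omega)]
      simp only [Int.toNat_zero, List.drop_zero, Nat.sub_zero]
      have hLn : L.toNat = ((p, d) :: t).length := by
        simp only [List.length_cons]
        omega
      rw [hLn, hplan, List.take_left]
    rw [hhead1, hhead2]
    simp
  · -- tail
    have hzip : (L :: c.map (· + L)).zip (c.map (· + L))
        = List.map (Prod.map (· + L) (· + L)) ((0 :: c).zip c) := by
      have : L :: c.map (· + L) = (0 :: c).map (· + L) := by simp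
      rw [this, List.zip_map]
    rw [hzip, List.map_map]
    apply List.map_congr_left
    intro ab hab
    obtain ⟨ha, hbm⟩ := List.of_mem_zip hab
    have ha' : 0 ≤ ab.1 := mem_boundsI_nonneg (xs := pvPitches r) (by rw [hc0]; exact ha)
    have hb' : 0 ≤ ab.2 := mem_boundsI_nonneg (xs := pvPitches r)
      (by rw [hc0]; exact List.mem_cons_of_mem _ hbm)
    simp only [Function.comp_apply]
    show (PySem.List.pyGetD (pvPitches ((p, d) :: rest)) (ab.1 + L) 0,
        ((PySem.List.slice ((p, d) :: rest) (some (ab.1 + L)) (some (ab.2 + L))).map Prod.snd).sum)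
      = (PySem.List.pyGetD (pvPitches r) ab.1 0,
        ((PySem.List.slice r (some ab.1) (some ab.2)).map Prod.snd).sum)
    have hf : PySem.List.pyGetD (pvPitches ((p, d) :: rest)) (ab.1 + L) 0
        = PySem.List.pyGetD (pvPitches r) ab.1 0 := by
      rw [hpitch, List.cons_append]
      have hsh := getI_shift p (t.map Prod.fst) (pvPitches r) (i := ab.1) ha'
      rw [← hLdef] at hsh
      rw [show ab.1 + L = L + ab.1 by ring]
      exact hsh
    have hLnn : 0 ≤ L := by omega
    have hs : PySem.List.slice ((p, d) :: rest) (some (ab.1 + L)) (some (ab.2 + L))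
        = PySem.List.slice r (some ab.1) (some ab.2) := by
      rw [PySem.List.slice_toNat _ (by omega) (by omega), PySem.List.slice_toNat _ ha' hb']
      have h1 : (ab.1 + L).toNat = L.toNat + ab.1.toNat := by omega
      have h2 : (ab.2 + L).toNat = L.toNat + ab.2.toNat := by omega
      rw [h1, hplan, ← List.drop_drop]
      have hdl : List.drop L.toNat (((p, d) :: t) ++ r) = r := by
        have hLn : L.toNat = ((p, d) :: t).length := by
          simp only [List.length_cons]
          omega
        rw [hLn, List.drop_left]
      rw [hdl]
      congr 1
      omega
    rw [hf, hs]

theorem merge_plan_alt_eq_mergeRuns (plan : List (Int × Int)) :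
    merge_plan_alt plan = mergeRuns plan := by
  induction plan using mergeRuns.induct with
  | case1 => rw [mergeRuns]; rfl
  | case2 p d rest ih =>
      rw [alt_step, ih]
      conv_rhs => rw [mergeRuns]

theorem foldl_mergeStep_push (ys : List (Int × Int)) :
    ∀ (p d : Int) (acc : List (Int × Int)),
      List.foldl mergeStep (acc ++ [(p, d)]) ys = acc ++ mergeRuns ((p, d) :: ys) := by
  induction ys with
  | nil =>
      intro p d acc
      simp [mergeRuns]
  | cons qe tl ih =>
      intro p d acc
      obtain ⟨q, e⟩ := qe
      by_cases h : q = p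
      · subst h
        have hstep : mergeStep (acc ++ [(q, d)]) (q, e) = acc ++ [(q, d + e)] := by
          simp [mergeStep]
        rw [List.foldl_cons, hstep, ih]
        simp only [mergeRuns, List.takeWhile_cons, List.dropWhile_cons]
        simp [add_assoc]
      · have hstep : mergeStep (acc ++ [(p, d)]) (q, e) = (acc ++ [(p, d)]) ++ [(q, e)] := by
          simp [mergeStep, Ne.symm h]
        rw [List.foldl_cons, hstep, ih]
        simp only [mergeRuns, List.takeWhile_cons, List.dropWhile_cons]
        simp only [h, beq_iff_eq, if_false, List.map_nil, List.sum_nil, add_zero]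
        rw [mergeRuns]
        simp

theorem merge_plan_eq_mergeRuns (plan : List (Int × Int)) : merge_plan plan = mergeRuns plan := by
  unfold merge_plan
  match plan with
  | [] => simp [mergeRuns]
  | (p, d) :: rest =>
      have := foldl_mergeStep_push rest p d []
      simpa [mergeStep] using this

-- ===== VERDICT (by name: the statement is the Claim_ definition above) =====
theorem merge_plan_spec : Claim_equal_merge_plan := by
  intro plan _
  unfold Spec_merge_plan
  rw [merge_plan_eq_mergeRuns, merge_plan_alt_eq_mergeRuns]
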